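-- pv_equiv track=rewrite | github.com/zrchn/GraPy | sandbox/_sbutils.py | remove_sublists
-- ===== SOURCE A (Python) =====
-- def remove_sublists(lists):
--     lists.sort(key=len, reverse=True)
--     result = []
--     for current in lists:
--         can_keep = True
--         for existing in lists:
--             if not current == existing:
--                 if len(current) >= len(existing) and current[:len(existing)] == existing:
--                     can_keep = False
--                     break
--             elif current in result:
--                 can_keep = False
--                 break
--         if can_keep:
--             result.append(current)
--     return result
-- ===== SOURCE B (Python) =====
-- def remove_sublists(lists):
--     # Note: like A, sorts `lists` in place (same observable mutation).
--     lists.sort(key=len, reverse=True)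
--     universe = {tuple(l) for l in lists}
--     seen = set()
--     result = []
--     for current in lists:
--         t = tuple(current)
--         if t in seen:
--             continue
--         if any(t[:k] in universe for k in range(len(t))):
--             continue
--         seen.add(t)
--         result.append(current)
--     return result
-- ===== Notes on version B (the rewrite author's own statement) =====
-- stated objective: alternative
-- what changed: Replaces A's inner scan of all lists for each candidate by one hash set of all lists, testing each candidate's proper prefixes by set lookup and deduplicating via a seen-set instead of scanning the result.
import Mathlib
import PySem

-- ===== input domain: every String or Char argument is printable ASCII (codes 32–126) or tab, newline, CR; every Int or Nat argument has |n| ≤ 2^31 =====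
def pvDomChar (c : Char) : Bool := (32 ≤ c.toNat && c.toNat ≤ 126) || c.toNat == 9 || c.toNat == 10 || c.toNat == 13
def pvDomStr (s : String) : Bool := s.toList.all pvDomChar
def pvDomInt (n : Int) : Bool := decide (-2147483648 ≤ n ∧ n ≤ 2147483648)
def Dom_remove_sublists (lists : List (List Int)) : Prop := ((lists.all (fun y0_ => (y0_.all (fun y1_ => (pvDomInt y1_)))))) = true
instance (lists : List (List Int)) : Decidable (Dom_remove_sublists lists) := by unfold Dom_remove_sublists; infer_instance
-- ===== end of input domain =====

-- B replaces A's inner scan over all lists by prefix lookups in a set of all lists (alternative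
-- algorithm, similar cost); A sorts its argument in place (B performs the same sort), and the
-- equivalence proved here is about the return value.

-- ===== PORT A =====
-- inner 'for existing in lists' loop with break semantics
def pvInnerA (current : List Int) (result : List (List Int)) : List (List Int) → Bool
  | [] => true
  | existing :: rest =>
    if current ≠ existing then
      -- current[:len(existing)] = current.take existing.length (slice bound is a nonneg length)
      if existing.length ≤ current.length ∧ current.take existing.length = existing then false
      else pvInnerA current result rest
    else if current ∈ result then false
    else pvInnerA current result rest

def pvOuterA (all : List (List Int)) (result : List (List Int)) : List (List Int) → List (List Int)
  | [] => result
  | current :: rest =>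
    if pvInnerA current result all then pvOuterA all (result ++ [current]) rest
    else pvOuterA all result rest

def remove_sublists (lists : List (List Int)) : List (List Int) :=
  let sortedLists := PySem.List.sorted lists (key := fun l => (l.length : Int)) (reverse := true)
  pvOuterA sortedLists [] sortedLists

-- ===== PORT B =====
-- 'any(t[:k] in univ for k in range(len(t)))'
def pvHasPrefixIn (univ : PySem.Set (List Int)) (t : List Int) : Bool :=
  (List.range t.length).any (fun k => PySem.Set.contains univ (t.take k))

def pvOuterB (univ : PySem.Set (List Int)) (seen : PySem.Set (List Int))
    (result : List (List Int)) : List (List Int) → List (List Int)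
  | [] => result
  | current :: rest =>
    if PySem.Set.contains seen current then pvOuterB univ seen result rest
    else if pvHasPrefixIn univ current then pvOuterB univ seen result rest
    else pvOuterB univ (PySem.Set.add seen current) (result ++ [current]) rest

def remove_sublists_alt (lists : List (List Int)) : List (List Int) :=
  let sortedLists := PySem.List.sorted lists (key := fun l => (l.length : Int)) (reverse := true)
  let univ := PySem.Set.ofList sortedLists
  pvOuterB univ PySem.Set.empty [] sortedLists

-- ===== PRECONDITION & SPEC =====
def Spec_remove_sublists (lists : List (List Int)) (out : List (List Int)) : Prop := out = remove_sublists_alt lists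
instance (lists : List (List Int)) (out : List (List Int)) : Decidable (Spec_remove_sublists lists out) := by unfold Spec_remove_sublists; infer_instance

-- ===== CLAIM (what is proved, stated in full; the proofs are below) =====
def Claim_equal_remove_sublists : Prop := ∀ (lists : List (List Int)), Dom_remove_sublists lists → Spec_remove_sublists lists (remove_sublists lists)

-- ===== LEMMAS AND PROOFS =====

-- A's inner loop returns true iff no distinct element of `all` is a prefix of `current`
-- and (if current occurs in all) current is not already in result.
lemma pvInnerA_true_iff (current : List Int) (result : List (List Int)) (all : List (List Int)) :
    pvInnerA current result all = true ↔
      (∀ e ∈ all, e ≠ current → ¬(e.length ≤ current.length ∧ current.take e.length = e)) ∧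
      (current ∈ all → current ∉ result) := by
  induction all with
  | nil => simp [pvInnerA]
  | cons existing rest ih =>
    by_cases hne : current = existing
    · subst hne
      rw [show pvInnerA current result (current :: rest)
            = (if current ∈ result then false else pvInnerA current result rest) from by
          simp [pvInnerA]]
      by_cases hmem : current ∈ result
      · rw [if_pos hmem]
        constructor
        · intro h; cases h
        · rintro ⟨-, h2⟩
          exact absurd hmem (h2 (List.mem_cons_self))
      · rw [if_neg hmem, ih]
        constructor
        · rintro ⟨h1, -⟩
          refine ⟨?_, fun _ => hmem⟩
          intro e he hene
          rcases List.mem_cons.mp he with he | he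
          · exact absurd he hene
          · exact h1 e he hene
        · rintro ⟨h1, -⟩
          exact ⟨fun e he hene => h1 e (List.mem_cons.mpr (Or.inr he)) hene, fun _ => hmem⟩
    · rw [show pvInnerA current result (existing :: rest)
            = (if existing.length ≤ current.length ∧ current.take existing.length = existing
                then false else pvInnerA current result rest) from by
          simp [pvInnerA, hne]]
      by_cases hpre : existing.length ≤ current.length ∧ current.take existing.length = existing
      · rw [if_pos hpre]
        constructor
        · intro h; cases h
        · rintro ⟨h1, -⟩
          exact absurd hpre (h1 existing List.mem_cons_self (fun he => hne he.symm))
      · rw [if_neg hpre, ih]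
        constructor
        · rintro ⟨h1, h2⟩
          refine ⟨?_, fun h => h2 ?_⟩
          · intro e he hene
            rcases List.mem_cons.mp he with he | he
            · subst he; exact hpre
            · exact h1 e he hene
          · rcases List.mem_cons.mp h with h | h
            · exact absurd h hne
            · exact h
        · rintro ⟨h1, h2⟩
          exact ⟨fun e he hene => h1 e (List.mem_cons.mpr (Or.inr he)) hene,
                 fun h => h2 (List.mem_cons.mpr (Or.inr h))⟩

-- B's prefix test over the range of proper-prefix lengths equals A's "some distinct element is a prefix".
lemma pvHasPrefixIn_iff (all : List (List Int)) (t : List Int) :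
    pvHasPrefixIn (PySem.Set.ofList all) t = true ↔
      ∃ e ∈ all, e ≠ t ∧ e.length ≤ t.length ∧ t.take e.length = e := by
  unfold pvHasPrefixIn
  simp only [List.any_eq_true, List.mem_range]
  constructor
  · rintro ⟨k, hk, hc⟩
    rw [PySem.Set.contains_iff, PySem.Set.mem_ofList] at hc
    refine ⟨t.take k, hc, ?_, ?_, ?_⟩
    · intro h
      have := congrArg List.length h
      simp [Nat.min_eq_left (Nat.le_of_lt hk)] at this
      omega
    · simp [Nat.min_eq_left (Nat.le_of_lt hk)]; omega
    · simp [Nat.min_eq_left (Nat.le_of_lt hk)]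
  · rintro ⟨e, he, hene, hlen, htake⟩
    have hlt : e.length < t.length := by
      rcases Nat.lt_or_ge e.length t.length with h | h
      · exact h
      · exfalso
        have : e.length = t.length := Nat.le_antisymm hlen h
        rw [this, List.take_length] at htake
        exact hene htake.symm
    refine ⟨e.length, hlt, ?_⟩
    rw [PySem.Set.contains_iff, PySem.Set.mem_ofList, htake]
    exact he

-- the main simulation: the two folds agree provided seen and result have the same members.
lemma pvOuter_eq (all : List (List Int)) :
    ∀ (todo : List (List Int)) (seen result : List (List Int)),
      (∀ x ∈ todo, x ∈ all) →
      (∀ x, x ∈ seen ↔ x ∈ result) →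
      pvOuterA all result todo = pvOuterB (PySem.Set.ofList all) seen result todo := by
  intro todo
  induction todo with
  | nil => intro seen result _ _; rfl
  | cons current rest ih =>
    intro seen result hsub hinv
    have hcur : current ∈ all := hsub current (by simp)
    have hrest : ∀ x ∈ rest, x ∈ all := fun x hx => hsub x (by simp [hx])
    have hAiff := pvInnerA_true_iff current result all
    simp only [pvOuterA, pvOuterB]
    by_cases hseen : current ∈ result
    · -- A's inner loop fails at existing = current; B skips via seen
      have hA : pvInnerA current result all = false := by
        rw [Bool.eq_false_iff]
        intro h
        exact (hAiff.mp h).2 hcur hseen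
      have hB : PySem.Set.contains seen current = true := by
        rw [PySem.Set.contains_iff, hinv]; exact hseen
      rw [hA, hB]
      simpa using ih seen result hrest hinv
    · have hB : PySem.Set.contains seen current = false := by
        rw [Bool.eq_false_iff, Ne, PySem.Set.contains_iff, hinv]
        exact hseen
      rw [hB]
      simp only [Bool.false_eq_true, if_false]
      by_cases hpre : ∃ e ∈ all, e ≠ current ∧ e.length ≤ current.length ∧ current.take e.length = e
      · have hA : pvInnerA current result all = false := by
          rw [Bool.eq_false_iff]
          intro h
          rcases hpre with ⟨e, he, hene, hc⟩
          exact (hAiff.mp h).1 e he hene hc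
        have hBp : pvHasPrefixIn (PySem.Set.ofList all) current = true := by
          rw [pvHasPrefixIn_iff]
          rcases hpre with ⟨e, he, hene, hc⟩
          exact ⟨e, he, hene, hc⟩
        rw [hA, hBp]
        simpa using ih seen result hrest hinv
      · have hA : pvInnerA current result all = true := by
          rw [hAiff]
          refine ⟨?_, fun _ => hseen⟩
          intro e he hene hc
          exact hpre ⟨e, he, hene, hc⟩
        have hBp : pvHasPrefixIn (PySem.Set.ofList all) current = false := by
          rw [Bool.eq_false_iff, Ne, pvHasPrefixIn_iff]
          intro ⟨e, he, hene, hc⟩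
          exact hpre ⟨e, he, hene, hc⟩
        rw [hA, hBp]
        simp only [Bool.false_eq_true, if_false, if_pos]
        apply ih
        · exact hrest
        · intro x
          rw [PySem.Set.mem_add, hinv]
          simp
  
-- ===== VERDICT (by name: the statement is the Claim_ definition above) =====
theorem remove_sublists_spec : Claim_equal_remove_sublists := by
  intro lists _
  unfold Spec_remove_sublists remove_sublists remove_sublists_alt
  exact pvOuter_eq _ _ PySem.Set.empty [] (fun _ hx => hx) (fun x => by simp [PySem.Set.empty])
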